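-- pv_equiv track=rewrite | github.com/foolishzhao/leetcode | python3/weekly-contest-186/_1422_Maximum_Score_After_Splitting_a_String/main.py | maxScore2
-- ===== SOURCE A (Python) =====
-- def maxScore2(s: str) -> int:
--     n = len(s)
--
--     leftZ = [0] * n
--     for i in range(1, n):
--         leftZ[i] = leftZ[i - 1]
--         if s[i - 1] == '0':
--             leftZ[i] += 1
--
--     rightO = [0] * n
--     for i in range(n - 2, -1, -1):
--         rightO[i] = rightO[i + 1]
--         if s[i + 1] == '1':
--             rightO[i] += 1
--
--     res = 0
--     for i in range(1, n):
--         res = max(res, leftZ[i] + rightO[i - 1])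
--     return res
-- ===== SOURCE B (Python) =====
-- def maxScore2(s: str) -> int:
--     total = s.count('1')
--     lz = 0
--     lo = 0
--     res = 0
--     for c in s[:-1]:
--         if c == '0':
--             lz += 1
--         elif c == '1':
--             lo += 1
--         res = max(res, lz + (total - lo))
--     return res
-- ===== Notes on version B (the rewrite author's own statement) =====
-- stated objective: simpler
-- what changed: Replaces A's two precomputed index tables (leftZ, rightO) and third max-pass by a single streaming pass: count total ones once, then sweep split points keeping running left-zero/left-one counters and deriving right ones as total - leftOnes.
import Mathlib
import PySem

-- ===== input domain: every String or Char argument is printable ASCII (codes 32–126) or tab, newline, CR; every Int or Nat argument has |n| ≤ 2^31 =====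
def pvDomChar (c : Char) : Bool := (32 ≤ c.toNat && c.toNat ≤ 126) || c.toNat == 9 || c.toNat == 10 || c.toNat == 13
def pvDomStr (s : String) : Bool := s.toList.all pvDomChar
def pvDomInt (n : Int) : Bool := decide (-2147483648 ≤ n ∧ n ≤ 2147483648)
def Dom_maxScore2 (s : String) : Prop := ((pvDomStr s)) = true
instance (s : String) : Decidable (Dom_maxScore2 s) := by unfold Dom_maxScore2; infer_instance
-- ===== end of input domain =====

-- B replaces A's two precomputed index tables and third pass by one streaming pass (O(1) extra space, same O(n) time).

-- ===== PORT A =====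
def maxScore2 (s : String) : Int :=
  let cs := s.toList
  let n : Int := cs.length
  let leftZ : List Int := (PySem.List.pyRange 1 n 1).foldl
    (fun lz i =>
      PySem.List.pySetD lz i
        (if PySem.List.pyGetD cs (i - 1) ' ' == '0'
         then PySem.List.pyGetD lz (i - 1) 0 + 1
         else PySem.List.pyGetD lz (i - 1) 0))
    (List.replicate n.toNat 0)
  let rightO : List Int := (PySem.List.pyRange (n - 2) (-1) (-1)).foldl
    (fun ro i =>
      PySem.List.pySetD ro i
        (if PySem.List.pyGetD cs (i + 1) ' ' == '1'
         then PySem.List.pyGetD ro (i + 1) 0 + 1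
         else PySem.List.pyGetD ro (i + 1) 0))
    (List.replicate n.toNat 0)
  (PySem.List.pyRange 1 n 1).foldl
    (fun res i => max res (PySem.List.pyGetD leftZ i 0 + PySem.List.pyGetD rightO (i - 1) 0))
    0

-- ===== PORT B =====
def maxScore2_alt (s : String) : Int :=
  let cs := s.toList
  let total : Int := cs.count '1'        -- s.count('1')
  let st := (PySem.List.slice cs none (some (-1))).foldl   -- for c in s[:-1]
    (fun (st : Int × Int × Int) c =>
      let p := if c == '0' then (st.1 + 1, st.2.1)
               else if c == '1' then (st.1, st.2.1 + 1)
               else (st.1, st.2.1)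
      (p.1, p.2, max st.2.2 (p.1 + (total - p.2))))
    (0, 0, 0)
  st.2.2

-- ===== PRECONDITION & SPEC =====
def Spec_maxScore2 (s : String) (out : Int) : Prop := out = maxScore2_alt s
instance (s : String) (out : Int) : Decidable (Spec_maxScore2 s out) := by unfold Spec_maxScore2; infer_instance

-- ===== CLAIM (what is proved, stated in full; the proofs are below) =====
def Claim_equal_maxScore2 : Prop := ∀ (s : String), Dom_maxScore2 s → Spec_maxScore2 s (maxScore2 s)

-- ===== LEMMAS AND PROOFS =====

-- zc cs i = zeros among the first i chars; oc cs i = ones from index i on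
def zc (cs : List Char) (i : ℕ) : Int := ((cs.take i).countP (· == '0') : Int)
def oc (cs : List Char) (i : ℕ) : Int := ((cs.drop i).count '1' : Int)

-- the common reference value: max over split points 1..m of zc + oc
def refR (cs : List Char) (m : ℕ) : Int :=
  (List.range m).foldl (fun r k => max r (zc cs (k + 1) + oc cs (k + 1))) 0

theorem set_map_range {α : Type} (n k : ℕ) (f : ℕ → α) (v : α) :
    ((List.range n).map f).set k v
      = (List.range n).map (fun j => if j = k then v else f j) := by
  apply List.ext_getElem
  · simp
  · intro i h1 h2
    simp only [List.getElem_set, List.getElem_map, List.getElem_range]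
    by_cases h : i = k
    · simp [h]
    · rw [if_neg (by omega), if_neg h]

theorem gd_map_range {α : Type} (n k : ℕ) (f : ℕ → α) (d : α) (hk : k < n) :
    ((List.range n).map f).getD k d = f k := by
  rw [List.getD_eq_getElem?_getD]
  simp [hk]

theorem take_concat (cs : List Char) (m : ℕ) (hm : m < cs.length) :
    cs.take (m + 1) = cs.take m ++ [cs[m]] := by
  rw [List.take_add_one, List.getElem?_eq_getElem hm]
  rfl

theorem zc_succ (cs : List Char) (m : ℕ) (hm : m < cs.length) :
    zc cs (m + 1) = zc cs m + (if cs[m] == '0' then 1 else 0) := by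
  unfold zc
  rw [take_concat cs m hm, List.countP_append]
  simp only [List.countP_cons, List.countP_nil]
  split <;> simp_all

theorem cnt1_succ (cs : List Char) (m : ℕ) (hm : m < cs.length) :
    ((cs.take (m + 1)).count '1' : Int)
      = ((cs.take m).count '1' : Int) + (if cs[m] == '1' then 1 else 0) := by
  rw [take_concat cs m hm, List.count_append]
  simp only [List.count_cons, List.count_nil, beq_iff_eq]
  split <;> simp_all

theorem oc_succ (cs : List Char) (m : ℕ) (hm : m < cs.length) :
    oc cs m = (if cs[m] == '1' then oc cs (m + 1) + 1 else oc cs (m + 1)) := by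
  unfold oc
  rw [List.drop_eq_getElem_cons hm]
  simp only [List.count_cons, beq_iff_eq]
  split <;> simp_all

theorem total_sub (cs : List Char) (m : ℕ) :
    (cs.count '1' : Int) - ((cs.take m).count '1' : Int) = oc cs m := by
  unfold oc
  have h : cs.count '1' = (cs.take m).count '1' + (cs.drop m).count '1' := by
    rw [← List.count_append, List.take_append_drop]
  rw [h]
  push_cast
  ring

theorem refR_succ (cs : List Char) (m : ℕ) :
    refR cs (m + 1) = max (refR cs m) (zc cs (m + 1) + oc cs (m + 1)) := by
  unfold refR
  rw [List.range_succ, List.foldl_append]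
  rfl

-- characterization of A's leftZ loop
theorem lemA_lz (cs : List Char) (k : ℕ) (hk : k ≤ cs.length) :
    (PySem.List.pyRange 1 (k : Int) 1).foldl
      (fun lz i =>
        PySem.List.pySetD lz i
          (if PySem.List.pyGetD cs (i - 1) ' ' == '0'
           then PySem.List.pyGetD lz (i - 1) 0 + 1
           else PySem.List.pyGetD lz (i - 1) 0))
      (List.replicate cs.length 0)
      = (List.range cs.length).map (fun j => if j < k then zc cs j else 0) := by
  induction k with
  | zero =>
      rw [PySem.List.pyRange_one_eq_nil (by norm_num)]
      simp [List.map_const']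
  | succ k ih =>
      by_cases hk0 : k = 0
      · subst hk0
        rw [show (((0 : ℕ) + 1 : ℕ) : Int) = 1 by norm_num,
          PySem.List.pyRange_one_eq_nil (by norm_num)]
        simp only [List.foldl_nil]
        apply List.ext_getElem
        · simp
        · intro i h1 h2
          simp only [List.getElem_replicate, List.getElem_map, List.getElem_range]
          split
          · next h =>
              have hi0 : i = 0 := by omega
              subst hi0
              simp [zc]
          · rfl
      · have hk1 : (1 : Int) ≤ (k : Int) := by omega
        have hrange : PySem.List.pyRange 1 ((k : Int) + 1) 1
            = PySem.List.pyRange 1 (k : Int) 1 ++ [(k : Int)] :=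
          PySem.List.pyRange_one_succ_right hk1
        push_cast
        rw [hrange, List.foldl_append, ih (by omega)]
        have hkn : k < cs.length := by omega
        have hk1n : k - 1 < cs.length := by omega
        simp only [List.foldl_cons, List.foldl_nil]
        have hidx : ((k : Int) - 1) = ((k - 1 : ℕ) : Int) := by omega
        rw [hidx]
        rw [PySem.List.pyGetD_natCast, PySem.List.pyGetD_natCast, PySem.List.pySetD_natCast]
        rw [gd_map_range _ _ _ _ (by omega)]
        have hlt : k - 1 < k := by omega
        simp only [if_pos hlt]
        rw [set_map_range]
        have hzk : (if cs.getD (k - 1) ' ' == '0'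
            then zc cs (k - 1) + 1 else zc cs (k - 1)) = zc cs k := by
          rw [List.getD_eq_getElem?_getD, List.getElem?_eq_getElem hk1n]
          have hz := zc_succ cs (k - 1) hk1n
          rw [show k - 1 + 1 = k by omega] at hz
          rw [hz]
          simp only [Option.getD_some]
          split <;> simp
        rw [hzk]
        apply List.map_congr_left
        intro j hj
        simp only [List.mem_range] at hj
        by_cases hjk : j = k
        · simp [hjk]
        · have hiff : (j < k) ↔ (j < k + 1) := by omega
          simp [hjk, hiff]

-- characterization of A's rightO loop (downward fill)
theorem lemA_ro (cs : List Char) (u : ℕ) (hu : u ≤ cs.length - 1) :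
    (PySem.List.pyRange ((u : Int) - 1) (-1) (-1)).foldl
      (fun ro i =>
        PySem.List.pySetD ro i
          (if PySem.List.pyGetD cs (i + 1) ' ' == '1'
           then PySem.List.pyGetD ro (i + 1) 0 + 1
           else PySem.List.pyGetD ro (i + 1) 0))
      ((List.range cs.length).map (fun j => if u ≤ j then oc cs (j + 1) else 0))
      = (List.range cs.length).map (fun j => oc cs (j + 1)) := by
  induction u with
  | zero =>
      rw [show ((0 : ℕ) : Int) - 1 = -1 by norm_num,
        PySem.List.pyRange_neg_one_eq_nil (by norm_num)]
      simp
  | succ u ih =>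
      have hn1 : 1 ≤ cs.length := by omega
      have hun : u + 1 < cs.length := by omega
      have hcons : PySem.List.pyRange (((u + 1 : ℕ) : Int) - 1) (-1) (-1)
          = (u : Int) :: PySem.List.pyRange ((u : Int) - 1) (-1) (-1) := by
        push_cast
        rw [show ((u : Int) + 1 - 1) = (u : Int) by ring]
        exact PySem.List.pyRange_neg_one_cons (by omega)
      rw [hcons, List.foldl_cons]
      have hstep :
          PySem.List.pySetD
            ((List.range cs.length).map (fun j => if u + 1 ≤ j then oc cs (j + 1) else 0))
            (u : Int)
            (if PySem.List.pyGetD cs ((u : Int) + 1) ' ' == '1'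
             then PySem.List.pyGetD
               ((List.range cs.length).map (fun j => if u + 1 ≤ j then oc cs (j + 1) else 0))
               ((u : Int) + 1) 0 + 1
             else PySem.List.pyGetD
               ((List.range cs.length).map (fun j => if u + 1 ≤ j then oc cs (j + 1) else 0))
               ((u : Int) + 1) 0)
            = (List.range cs.length).map (fun j => if u ≤ j then oc cs (j + 1) else 0) := by
        have hcast : ((u : Int) + 1) = ((u + 1 : ℕ) : Int) := by omega
        rw [hcast, PySem.List.pyGetD_natCast, PySem.List.pyGetD_natCast,
          PySem.List.pySetD_natCast]
        rw [gd_map_range _ _ _ _ hun]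
        simp only [le_refl, if_pos]
        have hval : (if cs.getD (u + 1) ' ' == '1'
            then oc cs (u + 1 + 1) + 1 else oc cs (u + 1 + 1)) = oc cs (u + 1) := by
          rw [List.getD_eq_getElem?_getD, List.getElem?_eq_getElem hun]
          rw [oc_succ cs (u + 1) hun]
          simp only [Option.getD_some]
          rfl
        rw [hval, set_map_range]
        apply List.map_congr_left
        intro j hj
        simp only [List.mem_range] at hj
        by_cases hjk : j = u
        · simp [hjk]
        · have hiff : (u + 1 ≤ j) ↔ (u ≤ j) := by omega
          simp [hjk, hiff]
      rw [hstep]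
      exact ih (by omega)

-- A's result written with the let-bindings zeta-reduced (definitionally equal)
theorem maxScoreA_eq (s : String) :
    maxScore2 s =
      (PySem.List.pyRange 1 (s.toList.length : Int) 1).foldl
        (fun res i => max res
          (PySem.List.pyGetD
            ((PySem.List.pyRange 1 (s.toList.length : Int) 1).foldl
              (fun lz i =>
                PySem.List.pySetD lz i
                  (if PySem.List.pyGetD s.toList (i - 1) ' ' == '0'
                   then PySem.List.pyGetD lz (i - 1) 0 + 1
                   else PySem.List.pyGetD lz (i - 1) 0))
              (List.replicate ((s.toList.length : Int)).toNat 0)) i 0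
           + PySem.List.pyGetD
            ((PySem.List.pyRange ((s.toList.length : Int) - 2) (-1) (-1)).foldl
              (fun ro i =>
                PySem.List.pySetD ro i
                  (if PySem.List.pyGetD s.toList (i + 1) ' ' == '1'
                   then PySem.List.pyGetD ro (i + 1) 0 + 1
                   else PySem.List.pyGetD ro (i + 1) 0))
              (List.replicate ((s.toList.length : Int)).toNat 0)) (i - 1) 0))
        0 := rfl

-- B's result with the let-bindings zeta-reduced (definitionally equal)
theorem maxScoreB_eq (s : String) :
    maxScore2_alt s =
      ((PySem.List.slice s.toList none (some (-1))).foldl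
        (fun (st : Int × Int × Int) c =>
          let p := if c == '0' then (st.1 + 1, st.2.1)
                   else if c == '1' then (st.1, st.2.1 + 1)
                   else (st.1, st.2.1)
          (p.1, p.2, max st.2.2 (p.1 + ((s.toList.count '1' : Int) - p.2))))
        (0, 0, 0)).2.2 := rfl

-- the leftZ table equals zc on all indices
theorem lz_final (cs : List Char) :
    (PySem.List.pyRange 1 (cs.length : Int) 1).foldl
      (fun lz i =>
        PySem.List.pySetD lz i
          (if PySem.List.pyGetD cs (i - 1) ' ' == '0'
           then PySem.List.pyGetD lz (i - 1) 0 + 1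
           else PySem.List.pyGetD lz (i - 1) 0))
      (List.replicate cs.length 0)
      = (List.range cs.length).map (fun j => zc cs j) := by
  rw [lemA_lz cs cs.length le_rfl]
  apply List.map_congr_left
  intro j hj
  simp only [List.mem_range] at hj
  simp [hj]

-- the rightO table equals oc (·+1) on all indices
theorem ro_final (cs : List Char) :
    (PySem.List.pyRange ((cs.length : Int) - 2) (-1) (-1)).foldl
      (fun ro i =>
        PySem.List.pySetD ro i
          (if PySem.List.pyGetD cs (i + 1) ' ' == '1'
           then PySem.List.pyGetD ro (i + 1) 0 + 1
           else PySem.List.pyGetD ro (i + 1) 0))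
      (List.replicate cs.length 0)
      = (List.range cs.length).map (fun j => oc cs (j + 1)) := by
  rcases Nat.eq_zero_or_pos cs.length with h | h
  · have hnil : cs = [] := List.length_eq_zero_iff.mp h
    subst hnil
    rw [PySem.List.pyRange_neg_one_eq_nil (by norm_num)]
    simp
  · have hcast : ((cs.length : Int) - 2) = ((cs.length - 1 : ℕ) : Int) - 1 := by omega
    have hinit : List.replicate cs.length (0 : Int)
        = (List.range cs.length).map
            (fun j => if cs.length - 1 ≤ j then oc cs (j + 1) else 0) := by
      apply List.ext_getElem
      · simp
      · intro i h1 h2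
        simp only [List.getElem_replicate, List.getElem_map, List.getElem_range]
        simp only [List.length_replicate] at h1
        split
        · next hle =>
            have hi : i = cs.length - 1 := by omega
            subst hi
            unfold oc
            rw [show cs.length - 1 + 1 = cs.length by omega]
            simp [List.drop_length]
        · rfl
    rw [hcast, hinit, lemA_ro cs (cs.length - 1) (by omega)]

-- A's final pass over the two tables computes refR
theorem lemA_res (cs : List Char) :
    (PySem.List.pyRange 1 (cs.length : Int) 1).foldl
      (fun res i => max res
        (PySem.List.pyGetD ((List.range cs.length).map (fun j => zc cs j)) i 0
         + PySem.List.pyGetD ((List.range cs.length).map (fun j => oc cs (j + 1))) (i - 1) 0))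
      0
      = refR cs (cs.length - 1) := by
  rw [PySem.List.pyRange_one]
  have hn : ((cs.length : Int) - 1).toNat = cs.length - 1 := by omega
  rw [hn, List.foldl_map]
  unfold refR
  apply PySem.List.foldl_congr_mem
  intro acc k hk
  simp only [List.mem_range] at hk
  have hk1 : k + 1 < cs.length := by omega
  have c1 : (1 : Int) + (k : Int) = ((k + 1 : ℕ) : Int) := by omega
  rw [c1, PySem.List.pyGetD_natCast, gd_map_range _ _ _ _ hk1]
  have c2 : ((k + 1 : ℕ) : Int) - 1 = ((k : ℕ) : Int) := by omega
  rw [c2, PySem.List.pyGetD_natCast, gd_map_range _ _ _ _ (by omega)]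

-- B's streaming pass: loop invariant over the first m processed characters
theorem lemB (cs : List Char) (m : ℕ) (hm : m ≤ cs.length - 1) :
    (cs.dropLast.take m).foldl
      (fun (st : Int × Int × Int) c =>
        let p := if c == '0' then (st.1 + 1, st.2.1)
                 else if c == '1' then (st.1, st.2.1 + 1)
                 else (st.1, st.2.1)
        (p.1, p.2, max st.2.2 (p.1 + ((cs.count '1' : Int) - p.2))))
      (0, 0, 0)
      = (zc cs m, ((cs.take m).count '1' : Int), refR cs m) := by
  induction m with
  | zero => simp [zc, refR]
  | succ m ih =>
      have hd : m < cs.dropLast.length := by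
        rw [List.length_dropLast]; omega
      have hmn : m < cs.length := by omega
      rw [take_concat cs.dropLast m hd, List.foldl_append, ih (by omega)]
      simp only [List.foldl_cons, List.foldl_nil, List.getElem_dropLast]
      rw [refR_succ, zc_succ cs m hmn, ← total_sub cs (m + 1), cnt1_succ cs m hmn]
      by_cases h0 : cs[m] = '0'
      · simp [h0]
      · by_cases h1 : cs[m] = '1'
        · simp [h1]
        · simp [h0, h1]

theorem maxScore2_spec : Claim_equal_maxScore2 := by
  intro s _
  unfold Spec_maxScore2
  rw [maxScoreA_eq, maxScoreB_eq]
  simp only [Int.toNat_natCast]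
  rw [lz_final s.toList, ro_final s.toList, lemA_res s.toList]
  rw [PySem.List.slice_to_neg_one]
  have hdl : s.toList.dropLast = s.toList.dropLast.take (s.toList.length - 1) := by
    rw [← List.length_dropLast, List.take_length]
  rw [hdl, lemB s.toList (s.toList.length - 1) le_rfl]
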